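-- pv_equiv track=rewrite | github.com/Insper/servidor-de-desafios | trace_challenge/trace_controller.py | extract_fillable_stdout
-- ===== SOURCE A (Python) =====
-- def extract_fillable_stdout(prev_stdout, cur_stdout):
--     if not prev_stdout:
--         prev_stdout = []
--     diff = cur_stdout[len(prev_stdout):]
--     last_input = -1
--     for i, line in reversed(list(enumerate(diff))):
--         if line.get('in'):
--             last_input = i
--             break
--     return prev_stdout + diff[:last_input + 1]
-- ===== SOURCE B (Python) =====
-- def extract_fillable_stdout(prev_stdout, cur_stdout):
--     if not prev_stdout:
--         prev_stdout = []
--     kept = cur_stdout[len(prev_stdout):]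
--     while kept and not kept[-1].get('in'):
--         kept.pop()
--     return prev_stdout + kept
-- ===== Notes on version B (the rewrite author's own statement) =====
-- stated objective: alternative
-- what changed: B never computes an input index: instead of A's reverse scan that finds the last truthy-'in' position and slices up to it, B trims the diff by popping falsy-'in' lines off its tail until a truthy one (or nothing) remains.
import Mathlib
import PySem

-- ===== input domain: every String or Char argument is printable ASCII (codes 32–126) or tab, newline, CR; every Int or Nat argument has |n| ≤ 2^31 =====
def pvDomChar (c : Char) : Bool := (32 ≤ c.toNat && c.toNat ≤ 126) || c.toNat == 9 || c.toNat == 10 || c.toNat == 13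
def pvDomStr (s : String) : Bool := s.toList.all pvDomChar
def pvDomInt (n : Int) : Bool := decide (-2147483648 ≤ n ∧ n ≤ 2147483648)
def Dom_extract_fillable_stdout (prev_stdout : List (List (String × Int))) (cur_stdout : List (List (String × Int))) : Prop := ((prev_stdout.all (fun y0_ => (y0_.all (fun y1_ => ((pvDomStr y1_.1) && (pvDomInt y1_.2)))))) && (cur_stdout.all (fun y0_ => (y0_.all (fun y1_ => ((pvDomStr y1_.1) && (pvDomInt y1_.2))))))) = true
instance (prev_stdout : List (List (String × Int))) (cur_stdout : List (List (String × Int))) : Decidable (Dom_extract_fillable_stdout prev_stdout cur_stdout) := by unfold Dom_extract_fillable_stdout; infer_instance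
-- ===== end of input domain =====

-- B trims falsy-'in' lines off the tail of the diff (a while/pop loop) instead of A's
-- reverse index scan followed by a slice; same cost, different decomposition ("alternative").

-- ===== PORT A =====
-- line.get('in') as first-match association-list lookup (exact for a Python dict in insertion order)
def pvGetIn : List (String × Int) → Option Int
  | [] => none
  | (k, v) :: rest => if k == "in" then some v else pvGetIn rest

-- Python truthiness of line.get('in'): missing key is falsy, an int is truthy iff nonzero
def pvTruthyIn (line : List (String × Int)) : Bool :=
  match pvGetIn line with
  | some v => v != 0
  | none => false

-- the reversed-enumerate loop with break: first truthy element's index, else the initial -1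
def pvLastInputLoop : List (Int × List (String × Int)) → Int
  | [] => -1
  | (i, line) :: rest => if pvTruthyIn line then i else pvLastInputLoop rest

def extract_fillable_stdout (prev_stdout : List (List (String × Int))) (cur_stdout : List (List (String × Int))) : List (List (String × Int)) :=
  -- 'if not prev_stdout: prev_stdout = []' is the identity on lists (None is not representable here)
  let diff := PySem.List.slice cur_stdout (some (prev_stdout.length : Int)) none
  let last_input := pvLastInputLoop (PySem.List.enumerate diff 0).reverse
  prev_stdout ++ PySem.List.slice diff none (some (last_input + 1))

-- ===== PORT B =====
-- 'while kept and not kept[-1].get('in'): kept.pop()' — drop the last element while it is falsy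
def pvPopLoop (kept : List (List (String × Int))) : List (List (String × Int)) :=
  match h : kept.getLast? with
  | none => kept
  | some l => if pvTruthyIn l then kept else pvPopLoop kept.dropLast
termination_by kept.length
decreasing_by
  have hne : kept ≠ [] := by intro hk; rw [hk] at h; simp at h
  have : kept.length ≠ 0 := by simpa using List.length_eq_zero_iff.not.mpr hne
  simp [List.length_dropLast]; omega

def extract_fillable_stdout_alt (prev_stdout : List (List (String × Int))) (cur_stdout : List (List (String × Int))) : List (List (String × Int)) :=
  let kept := PySem.List.slice cur_stdout (some (prev_stdout.length : Int)) none
  prev_stdout ++ pvPopLoop kept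

-- ===== PRECONDITION & SPEC =====
def Spec_extract_fillable_stdout (prev_stdout : List (List (String × Int))) (cur_stdout : List (List (String × Int))) (out : List (List (String × Int))) : Prop := out = extract_fillable_stdout_alt prev_stdout cur_stdout
instance (prev_stdout : List (List (String × Int))) (cur_stdout : List (List (String × Int))) (out : List (List (String × Int))) : Decidable (Spec_extract_fillable_stdout prev_stdout cur_stdout out) := by unfold Spec_extract_fillable_stdout; infer_instance

-- ===== CLAIM (what is proved, stated in full; the proofs are below) =====
def Claim_equal_extract_fillable_stdout : Prop := ∀ (prev_stdout : List (List (String × Int))) (cur_stdout : List (List (String × Int))), Dom_extract_fillable_stdout prev_stdout cur_stdout → Spec_extract_fillable_stdout prev_stdout cur_stdout (extract_fillable_stdout prev_stdout cur_stdout)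

-- ===== LEMMAS AND PROOFS =====

theorem popLoop_nil : pvPopLoop [] = [] := by unfold pvPopLoop; rfl

theorem popLoop_concat (xs : List (List (String × Int))) (p : List (String × Int)) :
    pvPopLoop (xs ++ [p]) = if pvTruthyIn p then xs ++ [p] else pvPopLoop xs := by
  rw [pvPopLoop]
  split
  · next h => simp at h
  · next l h =>
    rw [List.getLast?_concat] at h
    obtain rfl : p = l := by injection h
    simp

theorem lastInputLoop_bound (l : List (Int × List (String × Int))) (n : Int)
    (hn : 0 ≤ n) (h : ∀ p ∈ l, 0 ≤ p.1 ∧ p.1 < n) :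
    -1 ≤ pvLastInputLoop l ∧ pvLastInputLoop l < n := by
  induction l with
  | nil => refine ⟨by simp [pvLastInputLoop], ?_⟩; simp [pvLastInputLoop]; omega
  | cons q t ih =>
    obtain ⟨i, line⟩ := q
    simp only [pvLastInputLoop]
    by_cases ht : pvTruthyIn line
    · simp only [ht, if_true]
      have := h (i, line) (by simp)
      exact ⟨by omega, this.2⟩
    · simp only [ht]
      exact ih (fun p hp => h p (by simp [hp]))

theorem slice_lastInput_eq_popLoop (xs : List (List (String × Int))) :
    PySem.List.slice xs none
      (some (pvLastInputLoop (PySem.List.enumerate xs 0).reverse + 1)) = pvPopLoop xs := by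
  induction xs using List.reverseRecOn with
  | nil =>
    rw [popLoop_nil]
    norm_num [PySem.List.enumerate_nil, pvLastInputLoop]
    rw [PySem.List.slice_to _ le_rfl]
    simp
  | append_singleton xs p ih =>
    rw [PySem.List.enumerate_append]
    simp only [PySem.List.enumerate_cons, PySem.List.enumerate_nil, zero_add,
      List.reverse_append, List.reverse_singleton, List.singleton_append, pvLastInputLoop]
    rw [popLoop_concat]
    by_cases ht : pvTruthyIn p
    · simp only [ht, if_true]
      have hcast : ((xs.length : Int) + 1) = ((xs.length + 1 : Nat) : Int) := by push_cast; ring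
      rw [hcast, PySem.List.slice_to_natCast]
      exact List.take_of_length_le (by simp)
    · simp only [ht, Bool.false_eq_true, if_false]
      have hb := lastInputLoop_bound (PySem.List.enumerate xs 0).reverse (xs.length : Int)
        (by positivity) (by
          intro q hq
          rw [List.mem_reverse, PySem.List.mem_enumerate_iff] at hq
          obtain ⟨k, hk, rfl⟩ := hq
          simp; omega)
      set m := pvLastInputLoop (PySem.List.enumerate xs 0).reverse with hm
      obtain ⟨h1, h2⟩ := hb
      rw [PySem.List.slice_to _ (by omega)] at ih ⊢
      rw [List.take_append_of_le_length (by omega)]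
      exact ih

theorem extract_fillable_stdout_spec : Claim_equal_extract_fillable_stdout := by
  intro prev cur _
  unfold Spec_extract_fillable_stdout extract_fillable_stdout extract_fillable_stdout_alt
  simp only []
  rw [slice_lastInput_eq_popLoop]
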